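-- pv_equiv track=rewrite | github.com/ruthhhs/UnivCodeJourney | semester_3/daspro 25/praktikum7.py | maxNbHelp
-- ===== SOURCE A (Python) =====
-- def FirstElmt(L):
--     return L[0]
--
-- def Tail(L):
--     return L[1:]
--
-- def isEmpty(L):
--     return L == []
--
-- def maxNbHelp (L, max, count) :
--     if isEmpty(L) :
--         return [max, count]
--     else :
--         if FirstElmt(L) > max :
--             return maxNbHelp(Tail(L), FirstElmt(L), 1)
--         elif FirstElmt(L) == max :
--             return maxNbHelp(Tail(L), max, count +1)
--         else :
--             return maxNbHelp(Tail(L), max, count)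
-- ===== SOURCE B (Python) =====
-- def maxNbHelp(L, max, count):
--     for x in L:
--         if x > max:
--             max, count = x, 1
--         elif x == max:
--             count += 1
--     return [max, count]
-- ===== Notes on version B (the rewrite author's own statement) =====
-- stated objective: idiomatic
-- what changed: Replaced accumulator-passing recursion through FirstElmt/Tail/isEmpty helpers with a single iterative for-loop updating the running max and count in place.
import Mathlib
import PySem

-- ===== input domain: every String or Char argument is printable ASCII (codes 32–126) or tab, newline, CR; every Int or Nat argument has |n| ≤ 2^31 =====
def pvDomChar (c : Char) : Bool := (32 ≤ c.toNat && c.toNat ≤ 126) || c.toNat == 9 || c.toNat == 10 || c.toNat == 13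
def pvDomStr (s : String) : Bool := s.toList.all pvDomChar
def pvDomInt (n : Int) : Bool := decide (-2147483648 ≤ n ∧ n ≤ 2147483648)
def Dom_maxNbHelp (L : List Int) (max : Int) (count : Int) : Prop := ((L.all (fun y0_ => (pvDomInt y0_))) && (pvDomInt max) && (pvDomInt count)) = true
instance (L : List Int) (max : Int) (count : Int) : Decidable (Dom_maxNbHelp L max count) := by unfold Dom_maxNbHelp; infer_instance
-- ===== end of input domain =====

-- B replaces A's accumulator-passing recursion (FirstElmt/Tail/isEmpty) with a single iterative fold, same three-way branch; idiomatic, and avoids A's per-step list slicing.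


-- ===== PORT A =====
-- A: recursion with FirstElmt/Tail/isEmpty helpers, transliterated
def pvFirstElmt (L : List Int) : Option Int := PySem.List.pyGet? L 0
def pvTail (L : List Int) : List Int := PySem.List.slice L (some 1) none
def pvIsEmpty (L : List Int) : Bool := L == []
def maxNbHelp (L : List Int) (max : Int) (count : Int) : List Int :=
  if pvIsEmpty L then [max, count]
  else
    match pvFirstElmt L with
    | none => []  -- unreachable: L nonempty
    | some h =>
      if h > max then maxNbHelp (pvTail L) h 1
      else if h == max then maxNbHelp (pvTail L) max (count + 1)
      else maxNbHelp (pvTail L) max count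
termination_by L.length
decreasing_by all_goals (simp [pvTail, PySem.List.slice_from_one]; cases L <;> simp_all [pvIsEmpty])

-- ===== PORT B =====
-- B: single iterative pass (fold over the list with (max, count) state)
def maxNbHelp_alt (L : List Int) (max : Int) (count : Int) : List Int :=
  let p := L.foldl (fun (s : Int × Int) x =>
    if x > s.1 then (x, 1) else if x == s.1 then (s.1, s.2 + 1) else s) (max, count)
  [p.1, p.2]

-- ===== PRECONDITION & SPEC =====
def Spec_maxNbHelp (L : List Int) (max : Int) (count : Int) (out : List Int) : Prop := out = maxNbHelp_alt L max count
instance (L : List Int) (max : Int) (count : Int) (out : List Int) : Decidable (Spec_maxNbHelp L max count out) := by unfold Spec_maxNbHelp; infer_instance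

-- ===== CLAIM (what is proved, stated in full; the proofs are below) =====
def Claim_equal_maxNbHelp : Prop := ∀ (L : List Int) (max : Int) (count : Int), Dom_maxNbHelp L max count → Spec_maxNbHelp L max count (maxNbHelp L max count)

-- ===== LEMMAS AND PROOFS =====

-- ===== VERDICT (by name: the statement is the Claim_ definition above) =====
theorem maxNbHelp_agree : ∀ (L : List Int) (max count : Int), maxNbHelp L max count = maxNbHelp_alt L max count := by
  intro L
  induction L with
  | nil => intro m c; simp [maxNbHelp, maxNbHelp_alt, pvIsEmpty]
  | cons h t ih =>
    intro m c
    have htail : pvTail (h :: t) = t := by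
      simp [pvTail, PySem.List.slice_from_one]
    rw [maxNbHelp]
    simp only [pvIsEmpty, pvFirstElmt, PySem.List.pyGet?, htail]
    by_cases h1 : h > m
    · simp [h1, ih, maxNbHelp_alt, PySem.List.pyIdx?]
    · by_cases h2 : h = m
      · simp [h2, ih, maxNbHelp_alt, PySem.List.pyIdx?]
      · simp [h1, h2, ih, maxNbHelp_alt, PySem.List.pyIdx?]

theorem maxNbHelp_spec : Claim_equal_maxNbHelp := by
  intro L m c _
  unfold Spec_maxNbHelp
  exact maxNbHelp_agree L m c
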